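-- pv_equiv track=rewrite | github.com/whiteskull20/WEBIR-Final | midi_parser.py | group_events_by_onset
-- ===== SOURCE A (Python) =====
-- from collections import defaultdict
--
-- def group_events_by_onset(events):
--     """
--     將事件按照 onset time 分組
--
--     Args:
--         events: [(onset_time_ms, pitch), ...]
--
--     Returns:
--         list: [(onset_time_ms, [pitch1, pitch2, ...]), ...]
--     """
--     if not events:
--         return []
--
--     grouped = defaultdict(list)
--
--     for onset_time, pitch in events:
--         grouped[onset_time].append(pitch)
--
--     # 轉換為排序的列表
--     result = []
--     for onset_time in sorted(grouped.keys()):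
--         pitches = sorted(grouped[onset_time])  # 按音高排序
--         result.append((onset_time, pitches))
--
--     return result
-- ===== SOURCE B (Python) =====
-- from itertools import groupby
--
--
-- def group_events_by_onset(events):
--     # One global lexicographic sort, then a single groupby pass over consecutive
--     # equal onsets; the tuple sort already orders pitches within each onset.
--     return [(onset, [pitch for _, pitch in grp])
--             for onset, grp in groupby(sorted(events), key=lambda e: e[0])]
-- ===== Notes on version B (the rewrite author's own statement) =====
-- stated objective: idiomatic
-- what changed: Replaced the defaultdict grouping followed by a key sort and a per-group pitch sort with a single global lexicographic sort of the event tuples and one itertools.groupby pass over consecutive onsets.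
import Mathlib
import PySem

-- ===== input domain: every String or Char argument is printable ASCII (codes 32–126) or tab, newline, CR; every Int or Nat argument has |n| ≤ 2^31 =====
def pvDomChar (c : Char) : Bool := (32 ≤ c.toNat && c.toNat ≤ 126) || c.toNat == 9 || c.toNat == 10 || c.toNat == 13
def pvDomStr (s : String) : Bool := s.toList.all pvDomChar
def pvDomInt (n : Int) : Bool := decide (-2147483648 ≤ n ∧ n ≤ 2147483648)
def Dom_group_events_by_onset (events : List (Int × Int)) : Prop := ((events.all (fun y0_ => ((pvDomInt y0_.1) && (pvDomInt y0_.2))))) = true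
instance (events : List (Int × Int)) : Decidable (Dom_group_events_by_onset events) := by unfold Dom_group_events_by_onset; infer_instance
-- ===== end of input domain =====

-- B replaces the defaultdict grouping + per-group sorts of A by one global
-- lexicographic sort of the event tuples followed by a single groupby pass.


-- ===== PORT A =====
def group_events_by_onset (events : List (Int × Int)) : List (Int × List Int) :=
  if events = [] then []
  else
    -- grouped = defaultdict(list); for onset, pitch in events: grouped[onset].append(pitch)
    let grouped : PySem.Dict Int (List Int) :=
      events.foldl (fun d p => d.modify p.1 [] (fun v => v ++ [p.2])) PySem.Dict.empty
    -- result = []; for onset in sorted(grouped.keys()): result.append((onset, sorted(grouped[onset])))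
    (PySem.List.sorted grouped.keys (fun k => k) false).foldl
      (fun result k =>
        result ++ [(k, PySem.List.sorted (grouped.getD k []) (fun x => x) false)]) []

-- ===== PORT B =====
-- materialize one run of itertools.groupby: pitches of the leading elements with onset k,
-- and the remaining events
def takeRun (k : Int) : List (Int × Int) → List Int × List (Int × Int)
  | [] => ([], [])
  | (o, p) :: rest =>
    if o = k then
      let t := takeRun k rest
      (p :: t.1, t.2)
    else ([], (o, p) :: rest)

-- termination fact for groupRuns (cited in its decreasing_by)
theorem takeRun_snd_length (k : Int) (l : List (Int × Int)) :
    (takeRun k l).2.length ≤ l.length := by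
  induction l with
  | nil => simp [takeRun]
  | cons x rest ih =>
    obtain ⟨o, p⟩ := x
    by_cases h : o = k
    · simp [takeRun, h]; omega
    · simp [takeRun, h]

-- the groupby loop over the sorted events
def groupRuns : List (Int × Int) → List (Int × List Int)
  | [] => []
  | (o, p) :: rest =>
    let t := takeRun o rest
    (o, p :: t.1) :: groupRuns t.2
termination_by l => l.length
decreasing_by
  have := takeRun_snd_length o rest
  simp
  omega

def group_events_by_onset_alt (events : List (Int × Int)) : List (Int × List Int) :=
  groupRuns (PySem.List.sorted2 events (fun p => p.1) (fun p => p.2) false)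

-- ===== PRECONDITION & SPEC =====
def Spec_group_events_by_onset (events : List (Int × Int)) (out : List (Int × List Int)) : Prop := out = group_events_by_onset_alt events
instance (events : List (Int × Int)) (out : List (Int × List Int)) : Decidable (Spec_group_events_by_onset events out) := by unfold Spec_group_events_by_onset; infer_instance

-- ===== CLAIM (what is proved, stated in full; the proofs are below) =====
def Claim_equal_group_events_by_onset : Prop := ∀ (events : List (Int × Int)), Dom_group_events_by_onset events → Spec_group_events_by_onset events (group_events_by_onset events)

-- ===== LEMMAS AND PROOFS =====

-- the order sorted2 (= Python's tuple sort) establishes between consecutive events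
def lexle (p q : Int × Int) : Prop := p.1 < q.1 ∨ (p.1 = q.1 ∧ p.2 ≤ q.2)

-- the common canonical value both ports are proved equal to
def canon (events : List (Int × Int)) : List (Int × List Int) :=
  (PySem.List.sorted (PySem.Set.ofList (events.map (·.1))) (fun k => k) false).map
    (fun k => (k, PySem.List.sorted ((events.filter (fun p => p.1 == k)).map (·.2)) (fun x => x) false))

theorem takeRun_eq (k : Int) (l : List (Int × Int)) :
    takeRun k l = ((l.takeWhile (fun p => p.1 == k)).map (·.2),
                   l.dropWhile (fun p => p.1 == k)) := by
  induction l with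
  | nil => rfl
  | cons x rest ih =>
    obtain ⟨o, p⟩ := x
    by_cases h : o = k <;>
      simp [takeRun, h, ih, show (o == k) = decide (o = k) from rfl]

theorem dropWhile_head_false {α : Type} (q : α → Bool) :
    ∀ (l : List α) (x : α) (t : List α), l.dropWhile q = x :: t → q x = false := by
  intro l
  induction l with
  | nil => intro x t h; simp [List.dropWhile] at h
  | cons y rest ih =>
    intro x t h
    by_cases hy : q y
    · rw [List.dropWhile_cons_of_pos hy] at h; exact ih x t h
    · rw [List.dropWhile_cons_of_neg (by simp [hy])] at h
      cases h; simpa using hy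

theorem sorted2_eq_sorted_lex (xs : List (Int × Int)) :
    PySem.List.sorted2 xs (fun p => p.1) (fun p => p.2) false
      = PySem.List.sorted xs (fun p => toLex p) false := by
  have hfun : (fun (a b : Int × Int) =>
        decide (a.1 < b.1) || (!decide (b.1 < a.1) && decide (a.2 < b.2)))
      = fun (a b : Int × Int) => decide (toLex a < toLex b) := by
    funext a b
    apply Bool.eq_iff_iff.mpr
    simp only [Bool.or_eq_true, Bool.and_eq_true, Bool.not_eq_eq_eq_not, Bool.not_true,
      decide_eq_true_eq, decide_eq_false_iff_not, Prod.Lex.lt_iff, ofLex_toLex]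
    omega
  rw [PySem.List.sorted_eq_foldl_insertBy]
  show List.foldl (fun acc x => PySem.List.insertBy
      (fun (a b : Int × Int) =>
        decide (a.1 < b.1) || (!decide (b.1 < a.1) && decide (a.2 < b.2))) x acc) [] xs = _
  rw [hfun]

theorem sorted2_pairwise_lexle (xs : List (Int × Int)) :
    (PySem.List.sorted2 xs (fun p => p.1) (fun p => p.2) false).Pairwise lexle := by
  rw [sorted2_eq_sorted_lex]
  refine (PySem.List.sorted_pairwise xs (fun p => toLex p)).imp ?_
  intro a b hab
  rw [Prod.Lex.le_iff] at hab
  exact hab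

-- every element after the leading run has a strictly larger onset
theorem rem_fst_gt (o : Int) (p : Int) (rest : List (Int × Int))
    (h : ((o, p) :: rest).Pairwise lexle) :
    ∀ x ∈ rest.dropWhile (fun q => q.1 == o), o < x.1 := by
  intro x hx
  rcases hd : rest.dropWhile (fun q => q.1 == o) with _ | ⟨r0, t⟩
  · rw [hd] at hx; simp at hx
  · rw [hd] at hx
    have hr0ne : r0.1 ≠ o := by
      simpa using dropWhile_head_false _ rest r0 t hd
    have hsub : (r0 :: t).Sublist rest := hd ▸ List.dropWhile_sublist _
    have hpw : (r0 :: t).Pairwise lexle :=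
      ((List.pairwise_cons.mp h).2).sublist hsub
    have hr0mem : r0 ∈ rest := hsub.mem (by simp)
    have h1 : lexle (o, p) r0 := (List.pairwise_cons.mp h).1 r0 hr0mem
    have hor0 : o < r0.1 := by
      rcases h1 with h1 | ⟨h1, _⟩
      · exact h1
      · exact absurd h1.symm hr0ne
    rcases List.mem_cons.mp hx with rfl | hxt
    · exact hor0
    · have h2 := (List.pairwise_cons.mp hpw).1 x hxt
      rcases h2 with h2 | ⟨h2, _⟩ <;> omega

-- all onsets in the leading run are the group key
theorem pre_fst_eq (o : Int) (rest : List (Int × Int)) :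
    ∀ x ∈ rest.takeWhile (fun q => q.1 == o), x.1 = o := by
  intro x hx
  simpa using List.mem_takeWhile_imp hx

-- the pitches filtered for the leading key are the head pitch plus the leading run
theorem filter_head_run (o : Int) (p : Int) (rest : List (Int × Int))
    (h : ((o, p) :: rest).Pairwise lexle) :
    ((((o, p) :: rest).filter (fun q => q.1 == o)).map (·.2))
      = p :: (rest.takeWhile (fun q => q.1 == o)).map (·.2) := by
  conv_lhs => rw [← List.takeWhile_append_dropWhile (p := fun q => q.1 == o) (l := rest)]
  rw [List.filter_cons, List.filter_append]
  have h1 : (rest.takeWhile (fun q => q.1 == o)).filter (fun q => q.1 == o)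
      = rest.takeWhile (fun q => q.1 == o) :=
    List.filter_eq_self.mpr (fun x hx => by simp [pre_fst_eq o rest x hx])
  have h2 : (rest.dropWhile (fun q => q.1 == o)).filter (fun q => q.1 == o) = [] :=
    List.filter_eq_nil_iff.mpr (fun x hx => by
      have := rem_fst_gt o p rest h x hx; simp; omega)
  simp [h1, h2]

-- filtering for a key beyond the leading run skips the head and the run
theorem filter_later_key (o : Int) (p : Int) (rest : List (Int × Int)) (k : Int)
    (hk : o < k) :
    ((o, p) :: rest).filter (fun q => q.1 == k)
      = (rest.dropWhile (fun q => q.1 == o)).filter (fun q => q.1 == k) := by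
  conv_lhs => rw [← List.takeWhile_append_dropWhile (p := fun q => q.1 == o) (l := rest)]
  rw [List.filter_cons, List.filter_append]
  have h1 : (rest.takeWhile (fun q => q.1 == o)).filter (fun q => q.1 == k) = [] :=
    List.filter_eq_nil_iff.mpr (fun x hx => by
      have := pre_fst_eq o rest x hx; simp; omega)
  have h2 : (o == k) = false := by simp; omega
  simp [h1, h2]

-- membership in groupRuns' keys = membership in the onsets, for a sorted list
theorem groupRuns_mem_fst : ∀ (l : List (Int × Int)), l.Pairwise lexle →
    ∀ k, k ∈ (groupRuns l).map (·.1) ↔ k ∈ l.map (·.1)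
  | [], _, k => by simp [groupRuns]
  | (o, p) :: rest, h, k => by
    have hrem : (rest.dropWhile (fun q => q.1 == o)).Pairwise lexle :=
      ((List.pairwise_cons.mp h).2).sublist (List.dropWhile_sublist _)
    have ih := groupRuns_mem_fst (rest.dropWhile (fun q => q.1 == o)) hrem k
    have hsplit : rest.takeWhile (fun q => q.1 == o) ++ rest.dropWhile (fun q => q.1 == o) = rest :=
      List.takeWhile_append_dropWhile
    constructor
    · intro hk
      rw [groupRuns, takeRun_eq] at hk
      simp only [List.map_cons, List.mem_cons] at hk
      rcases hk with rfl | hk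
      · simp
      · have := ih.mp hk
        simp only [List.map_cons, List.mem_cons]
        right
        rw [← hsplit, List.map_append]
        exact List.mem_append_right _ this
    · intro hk
      rw [groupRuns, takeRun_eq]
      simp only [List.map_cons, List.mem_cons]
      rw [List.map_cons, List.mem_cons, ← hsplit, List.map_append, List.mem_append] at hk
      rcases hk with rfl | hk | hk
      · left; rfl
      · left
        rcases List.mem_map.mp hk with ⟨x, hx, rfl⟩
        exact pre_fst_eq o rest x hx
      · right; exact ih.mpr hk
termination_by l => l.length
decreasing_by
  simp only [List.length_cons]
  have := List.length_dropWhile_le (fun q : Int × Int => q.1 == o) rest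
  omega

theorem groupRuns_fst_pairwise_lt : ∀ (l : List (Int × Int)), l.Pairwise lexle →
    ((groupRuns l).map (·.1)).Pairwise (· < ·)
  | [], _ => by simp [groupRuns]
  | (o, p) :: rest, h => by
    have hrem : (rest.dropWhile (fun q => q.1 == o)).Pairwise lexle :=
      ((List.pairwise_cons.mp h).2).sublist (List.dropWhile_sublist _)
    rw [groupRuns, takeRun_eq]
    simp only [List.map_cons]
    refine List.pairwise_cons.mpr ⟨?_, groupRuns_fst_pairwise_lt _ hrem⟩
    intro k hk
    have hk' := (groupRuns_mem_fst _ hrem k).mp hk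
    rcases List.mem_map.mp hk' with ⟨x, hx, rfl⟩
    exact rem_fst_gt o p rest h x hx
termination_by l => l.length
decreasing_by
  simp only [List.length_cons]
  have := List.length_dropWhile_le (fun q : Int × Int => q.1 == o) rest
  omega

-- the value stored with key k in groupRuns is the pitches with onset k, in order
theorem groupRuns_snd : ∀ (l : List (Int × Int)), l.Pairwise lexle →
    ∀ k v, (k, v) ∈ groupRuns l → v = (l.filter (fun p => p.1 == k)).map (·.2)
  | [], _, k, v => by simp [groupRuns]
  | (o, p) :: rest, h, k, v => by
    intro hm
    rw [groupRuns, takeRun_eq] at hm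
    have hrem : (rest.dropWhile (fun q => q.1 == o)).Pairwise lexle :=
      ((List.pairwise_cons.mp h).2).sublist (List.dropWhile_sublist _)
    rcases List.mem_cons.mp hm with heq | hm
    · obtain ⟨rfl, rfl⟩ := Prod.mk.injEq .. |>.mp heq
      exact (filter_head_run _ _ _ h).symm
    · have hv := groupRuns_snd _ hrem k v hm
      have hkmem : k ∈ (groupRuns (rest.dropWhile (fun q => q.1 == o))).map (·.1) :=
        List.mem_map.mpr ⟨(k, v), hm, rfl⟩
      have hok : o < k := by
        rcases List.mem_map.mp ((groupRuns_mem_fst _ hrem k).mp hkmem) with ⟨x, hx, rfl⟩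
        exact rem_fst_gt o p rest h x hx
      rw [hv, filter_later_key o p rest k hok]
termination_by l => l.length
decreasing_by
  simp only [List.length_cons]
  have := List.length_dropWhile_le (fun q : Int × Int => q.1 == o) rest
  omega

theorem alt_eq_canon (events : List (Int × Int)) :
    group_events_by_onset_alt events = canon events := by
  set s := PySem.List.sorted2 events (fun p => p.1) (fun p => p.2) false with hs
  have hpw : s.Pairwise lexle := sorted2_pairwise_lexle events
  have hperm : s.Perm events := PySem.List.sorted2_perm events _ _ _
  -- the key list of groupRuns s is exactly sorted(set(onsets))
  have hkeys : PySem.List.sorted (PySem.Set.ofList (events.map (·.1))) (fun k => k) false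
      = (groupRuns s).map (·.1) := by
    apply PySem.List.sorted_eq_of_perm_of_pairwise_lt
    · refine (List.perm_ext_iff_of_nodup ?_ (PySem.Set.nodup_ofList _)).mpr ?_
      · exact (groupRuns_fst_pairwise_lt s hpw).nodup.imp (fun h => by omega)
      · intro k
        rw [groupRuns_mem_fst s hpw k, PySem.Set.mem_ofList]
        exact List.Perm.mem_iff (hperm.map _)
    · exact groupRuns_fst_pairwise_lt s hpw
  show groupRuns s = canon events
  rw [canon, hkeys]
  -- entrywise: each entry of groupRuns s is (k, sorted pitches of onset k)
  apply List.ext_getElem (by simp)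
  intro i hi hi'
  simp only [List.getElem_map]
  have hmem : ((groupRuns s)[i].1, (groupRuns s)[i].2) ∈ groupRuns s := by
    simp
  have hv := groupRuns_snd s hpw _ _ hmem
  refine Prod.ext rfl ?_
  show (groupRuns s)[i].2
      = PySem.List.sorted ((events.filter (fun p => p.1 == (groupRuns s)[i].1)).map (·.2))
          (fun x => x) false
  rw [hv]
  symm
  apply PySem.List.sorted_id_eq_of_perm_of_pairwise
  · exact ((hperm.filter _).map _)
  · rw [List.pairwise_map]
    refine (hpw.filter _).imp_of_mem ?_
    intro a b ha hb hab
    have ha' : a.1 = (groupRuns s)[i].1 := by simpa using (List.mem_filter.mp ha).2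
    have hb' : b.1 = (groupRuns s)[i].1 := by simpa using (List.mem_filter.mp hb).2
    rcases hab with hab | ⟨_, hab⟩ <;> omega

theorem a_eq_canon (events : List (Int × Int)) :
    group_events_by_onset events = canon events := by
  by_cases hne : events = []
  · subst hne; rfl
  · rw [group_events_by_onset, if_neg hne, canon]
    have hkeys : (events.foldl (fun d p => d.modify p.1 [] (fun v => v ++ [p.2]))
        PySem.Dict.empty).keys = PySem.Set.ofList (events.map (·.1)) := by
      rw [PySem.Dict.keys_foldl_modify_key events (fun p => p.1) [] (fun _ p => fun v => v ++ [p.2])]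
      rw [PySem.Dict.keys_empty, PySem.Set.update_nil_left]
    have hget : ∀ k, (events.foldl (fun d p => d.modify p.1 [] (fun v => v ++ [p.2]))
        PySem.Dict.empty).getD k [] = (events.filter (fun p => p.1 == k)).map (·.2) := by
      intro k
      rw [PySem.Dict.getD_foldl_modify_append events PySem.Dict.empty k, PySem.Dict.getD_empty]
      simp
    simp only [hkeys, hget, PySem.List.foldl_append_singleton_eq_map, List.nil_append]

-- ===== VERDICT (by name: the statement is the Claim_ definition above) =====
theorem group_events_by_onset_spec : Claim_equal_group_events_by_onset := by
  intro events _
  show group_events_by_onset events = group_events_by_onset_alt events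
  rw [a_eq_canon, alt_eq_canon]
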